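-- pv_equiv track=rewrite | github.com/a-brandon/practice | codewars/primes_with_even_digits.py | f
-- ===== SOURCE A (Python) =====
-- def f(n):
--     nums = {}
--
--     for i in range(n - 1, 0, -1):
--         primes = [j for j in range(2, i + 1) if i % j == 0]
--         count = 0
--         if len(primes) == 1:
--             evens = [int(i) for i in list(str(i))]
--             for num in evens:
--                 if num in [2, 4, 6, 8, 0]:
--                     count += 1
--             if count >= 1:
--                 nums[i] = count
--     return max(nums, key=nums.get)
-- ===== SOURCE B (Python) =====
-- def f(n):
--     # Sieve: mark every multiple q = p*p, p*p+p, ... for each p with p*p < n,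
--     # then one descending scan keeping the first (= largest) index with the
--     # maximal count of even digits.  Return value only; A raises for n <= 2.
--     size = n if n > 0 else 0
--     comp = [False] * size
--     p = 2
--     while p * p < n:
--         q = p * p
--         while q < n:
--             comp[q] = True
--             q += p
--         p += 1
--     best = 0
--     bestc = 0
--     i = n - 1
--     while i >= 2:
--         if not comp[i]:
--             c = sum(1 for ch in str(i) if ch in "02468")
--             if c > bestc:
--                 best, bestc = i, c
--         i -= 1
--     return best
-- ===== Notes on version B (the rewrite author's own statement) =====
-- stated objective: faster
-- what changed: Trial-division over all j in [2,i] for every i plus a dict-then-max pass is replaced by a multiples-marking sieve followed by a single descending scan that keeps a running best, so the per-number divisor scan disappears.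
-- outside the precondition, e.g. on f(2): A raises ValueError, B returns 0; on f(0): A raises ValueError, B returns 0
import Mathlib
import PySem

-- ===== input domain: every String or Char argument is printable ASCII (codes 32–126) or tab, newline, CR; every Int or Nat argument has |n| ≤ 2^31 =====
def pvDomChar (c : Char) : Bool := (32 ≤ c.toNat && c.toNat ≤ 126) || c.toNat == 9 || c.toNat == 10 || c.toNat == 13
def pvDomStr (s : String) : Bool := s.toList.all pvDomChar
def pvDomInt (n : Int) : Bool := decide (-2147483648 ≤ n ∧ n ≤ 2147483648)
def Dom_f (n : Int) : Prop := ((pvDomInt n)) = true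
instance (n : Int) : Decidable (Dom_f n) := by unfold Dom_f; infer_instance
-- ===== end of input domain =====

-- B replaces A's per-number trial division plus dict-then-max pass by a multiples-marking
-- sieve and a single descending best-tracking scan (measured asymptotically faster).

-- ===== PORT A =====
-- literal transliteration of A: build the dict over range(n-1, 0, -1), then max(nums, key=nums.get)
-- (max on an empty dict raises ValueError: excluded by Pre_f; .getD 0 only totalises).
def f (n : Int) : Int :=
  let nums := (PySem.List.pyRange (n - 1) 0 (-1)).foldl (fun nums i =>
    let primes := (PySem.List.pyRange 2 (i + 1) 1).filter (fun j => PySem.Int.mod i j == 0)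
    let count : Int := 0
    if primes.length == 1 then
      let evens := (PySem.Int.toChars i).map (fun ch => (PySem.Int.ofChars? [ch]).getD 0)
      let count := evens.foldl (fun count num =>
        if num ∈ ([2, 4, 6, 8, 0] : List Int) then count + 1 else count) count
      if count ≥ 1 then nums.insert i count else nums
    else nums) PySem.Dict.empty
  (PySem.List.max? nums.keys (fun k => nums.getD k 0)).getD 0

-- ===== PORT B =====
-- B-side helpers: the three while-loops of Source B.  The two sieve loops take a fuel
-- argument that only bounds the iteration count (guards making the recursion total);
-- comp[q] = True is comp.set q.toNat true (q ≥ 0 on every executed iteration) and the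
-- read comp[i] is pyGetD comp i false (always in range on executed iterations).
def markMul (n p : Int) : Nat → Int → List Bool → List Bool
  | 0, _, comp => comp
  | fuel + 1, q, comp =>
    if q < n then markMul n p fuel (q + p) (comp.set q.toNat true) else comp

def sieveLoop (n : Int) : Nat → Int → List Bool → List Bool
  | 0, _, comp => comp
  | fuel + 1, p, comp =>
    if p * p < n then
      sieveLoop n fuel (p + 1) (markMul n p (n - p * p).toNat (p * p) comp)
    else comp

def scanLoop (n : Int) (comp : List Bool) : Nat → Int → Int → Int → Int
  | 0, _, best, _ => best
  | fuel + 1, i, best, bestc =>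
    if 2 ≤ i then
      if PySem.List.pyGetD comp i false = false then
        let c : Int := ((PySem.Int.toChars i).countP (fun ch => ch ∈ ['0', '2', '4', '6', '8']) : Nat)
        if c > bestc then scanLoop n comp fuel (i - 1) i c
        else scanLoop n comp fuel (i - 1) best bestc
      else scanLoop n comp fuel (i - 1) best bestc
    else best

def f_alt (n : Int) : Int :=
  let size : Int := if 0 < n then n else 0
  let comp := List.replicate size.toNat false
  let comp := sieveLoop n n.toNat 2 comp
  scanLoop n comp n.toNat (n - 1) 0 0

-- ===== PRECONDITION & SPEC =====
-- Pre_f: exactly the inputs where A returns; for n ≤ 2 the dict stays empty and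
-- max(...) raises ValueError (for n ≥ 3 the prime 2, whose digit is even, is in the dict).
def Pre_f (n : Int) : Prop := 3 ≤ n
instance (n : Int) : Decidable (Pre_f n) := by unfold Pre_f; infer_instance

def pvWitness_f : Int := 10

def Spec_f (n : Int) (out : Int) : Prop := out = f_alt n
instance (n : Int) (out : Int) : Decidable (Spec_f n out) := by unfold Spec_f; infer_instance

-- ===== CLAIM (what is proved, stated in full; the proofs are below) =====
def Claim_equal_f : Prop := ∀ (n : Int), Dom_f n → Pre_f n → Spec_f n (f n)

-- ===== LEMMAS AND PROOFS =====

-- B's even-digit count (and, via digitsEq below, A's too)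
def cB (i : Int) : Int :=
  ((PySem.Int.toChars i).countP (fun ch => ch ∈ ['0', '2', '4', '6', '8']) : Nat)

-- A's primality test as a Bool
def isAP (i : Int) : Bool :=
  ((PySem.List.pyRange 2 (i + 1) 1).filter (fun j => PySem.Int.mod i j == 0)).length == 1

-- A's insertion condition
def condA (i : Int) : Bool := isAP i && decide (1 ≤ cB i)

-- "i has a divisor d with d*d ≤ i" (what the sieve marks)
def Marked (p i : Int) : Prop := ∃ d, 2 ≤ d ∧ d < p ∧ d * d ≤ i ∧ d ∣ i

-- every char str() produces for a nonnegative int is a decimal digit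
lemma digitChar_mem (r : Nat) (h : r < 10) :
    r.digitChar ∈ ['0','1','2','3','4','5','6','7','8','9'] := by
  interval_cases r <;> decide

lemma toDigitsCore_mem (fuel : Nat) : ∀ (m : Nat) (ds : List Char),
    (∀ c ∈ ds, c ∈ ['0','1','2','3','4','5','6','7','8','9']) →
    ∀ c ∈ Nat.toDigitsCore 10 fuel m ds, c ∈ ['0','1','2','3','4','5','6','7','8','9'] := by
  induction fuel with
  | zero => intro m ds hds; simpa [Nat.toDigitsCore] using hds
  | succ fuel ih =>
    intro m ds hds c hc
    rw [Nat.toDigitsCore] at hc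
    have hdig : ∀ c ∈ (m % 10).digitChar :: ds, c ∈ ['0','1','2','3','4','5','6','7','8','9'] := by
      intro c' hc'
      rcases List.mem_cons.mp hc' with rfl | hc2
      · exact digitChar_mem _ (Nat.mod_lt _ (by norm_num))
      · exact hds _ hc2
    by_cases h0 : m / 10 = 0
    · rw [if_pos h0] at hc
      exact hdig c hc
    · rw [if_neg h0] at hc
      exact ih _ _ hdig c hc

lemma toChars_digits (i : Int) (hi : 0 ≤ i) :
    ∀ c ∈ PySem.Int.toChars i, c ∈ ['0','1','2','3','4','5','6','7','8','9'] := by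
  unfold PySem.Int.toChars
  rw [if_neg (by omega)]
  unfold Nat.toDigits
  exact toDigitsCore_mem _ _ [] (by simp)

-- A's digit count equals B's
lemma countEq (i : Int) (hi : 0 ≤ i) :
    ((PySem.Int.toChars i).map (fun ch => (PySem.Int.ofChars? [ch]).getD 0)).foldl
      (fun count num => if num ∈ ([2, 4, 6, 8, 0] : List Int) then count + 1 else count) 0
    = cB i := by
  rw [show (fun (count : Int) num => if num ∈ ([2, 4, 6, 8, 0] : List Int) then count + 1 else count)
      = (fun (count : Int) num =>
          if (fun num => decide (num ∈ ([2, 4, 6, 8, 0] : List Int))) num = true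
          then count + 1 else count) by
    funext c x; simp]
  rw [PySem.List.foldl_count_if]
  rw [List.countP_map]
  unfold cB
  have : ((PySem.Int.toChars i).countP
        ((fun num => decide (num ∈ ([2, 4, 6, 8, 0] : List Int))) ∘
          fun ch => (PySem.Int.ofChars? [ch]).getD 0))
      = ((PySem.Int.toChars i).countP (fun ch => decide (ch ∈ ['0', '2', '4', '6', '8']))) := by
    apply List.countP_congr
    intro c hc
    have hd := toChars_digits i hi c hc
    fin_cases hd <;> decide
  rw [this]
  omega

-- A's primality test characterised
lemma isAP_iff (i : Int) (hi : 1 ≤ i) :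
    isAP i = true ↔ (2 ≤ i ∧ ∀ j, 2 ≤ j → j < i → ¬ (j ∣ i)) := by
  unfold isAP
  rcases eq_or_lt_of_le hi with h1 | h2
  · have hi1 : i = 1 := h1.symm
    subst hi1
    rw [show (1 : Int) + 1 = 2 by norm_num]
    rw [PySem.List.pyRange_one_eq_nil (by norm_num : (2:Int) ≤ 2)]
    simp
  · have h2 : 2 ≤ i := by omega
    rw [show PySem.List.pyRange 2 (i + 1) 1 = PySem.List.pyRange 2 i 1 ++ [i] from
      PySem.List.pyRange_one_succ_right h2]
    rw [List.filter_append]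
    have hii : PySem.Int.mod i i == 0 := by
      simp [PySem.Int.mod_eq_zero_iff_dvd]
    simp only [List.filter_cons, List.filter_nil, hii, List.length_append]
    constructor
    · intro h
      refine ⟨h2, fun j hj2 hji hdvd => ?_⟩
      have hlen : (List.filter (fun j => PySem.Int.mod i j == 0)
          (PySem.List.pyRange 2 i 1)).length = 0 := by
        simp at h ⊢
        omega
      rw [List.length_eq_zero_iff, List.filter_eq_nil_iff] at hlen
      have hj' : j ∈ PySem.List.pyRange 2 i 1 := by
        rw [PySem.List.mem_pyRange_one]; exact ⟨hj2, hji⟩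
      have := hlen j hj'
      simp [PySem.Int.mod_eq_zero_iff_dvd, hdvd] at this
    · rintro ⟨-, hnd⟩
      have hlen : List.filter (fun j => PySem.Int.mod i j == 0)
          (PySem.List.pyRange 2 i 1) = [] := by
        rw [List.filter_eq_nil_iff]
        intro j hj
        rw [PySem.List.mem_pyRange_one] at hj
        simp [PySem.Int.mod_eq_zero_iff_dvd]
        exact hnd j hj.1 hj.2
      simp [hlen]

-- no small divisor ↔ no divisor at all
lemma noDvd_iff (i : Int) (hi : 2 ≤ i) :
    (∀ j, 2 ≤ j → j < i → ¬ (j ∣ i)) ↔ ¬ (∃ d, 2 ≤ d ∧ d * d ≤ i ∧ d ∣ i) := by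
  constructor
  · rintro h ⟨d, hd2, hdd, hdvd⟩
    have hdi : d < i := by nlinarith
    exact h d hd2 hdi hdvd
  · rintro h j hj2 hji hdvd
    apply h
    obtain ⟨k, hk⟩ := hdvd
    have hk2 : 2 ≤ k := by nlinarith
    rcases le_total j k with hle | hle
    · exact ⟨j, hj2, by nlinarith, ⟨k, hk⟩⟩
    · exact ⟨k, hk2, by nlinarith, ⟨j, by rw [hk]; ring⟩⟩

-- ===== dict structure =====
lemma dict_items (L : List Int) (hL : L.Nodup) :
    ((L.foldl (fun d i => if condA i then d.insert i (cB i) else d)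
        (PySem.Dict.empty : PySem.Dict Int Int)).items)
      = (L.filter condA).map (fun i => (i, cB i)) := by
  induction L using List.reverseRecOn with
  | nil => rfl
  | append_singleton L x ih =>
    have hL' : L.Nodup := hL.sublist (List.sublist_append_left _ _)
    have hx : x ∉ L := by
      intro hmem
      have := List.disjoint_of_nodup_append hL
      exact this hmem (by simp)
    rw [List.foldl_append, List.foldl_cons, List.foldl_nil]
    by_cases hc : condA x = true
    · rw [if_pos hc]
      have hnc : (L.foldl (fun d i => if condA i then d.insert i (cB i) else d)
          (PySem.Dict.empty : PySem.Dict Int Int)).contains x = false := by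
        rw [Bool.eq_false_iff]
        intro hcont
        have hk := (PySem.Dict.contains_iff_mem_keys _ _).mp hcont
        rw [show (PySem.Dict.keys (L.foldl (fun d i => if condA i then d.insert i (cB i) else d)
            PySem.Dict.empty)) = ((L.filter condA).map (fun i => (i, cB i))).map (fun p => p.1)
          from by rw [← ih hL']; rfl] at hk
        simp only [List.map_map] at hk
        have : x ∈ L.filter condA := by simpa using hk
        exact hx (List.mem_of_mem_filter this)
      rw [PySem.Dict.items_insert_of_not_contains _ _ hnc, ih hL']
      simp [List.filter_append, List.filter_cons, hc]
    · rw [if_neg hc, ih hL']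
      simp [List.filter_append, List.filter_cons, hc]

-- ===== sieve correctness =====
lemma markMul_spec (n p : Int) (hp : 2 ≤ p) (fuel : Nat) (q : Int) (hq : 0 ≤ q)
    (hfuel : (n - q).toNat ≤ fuel) (comp : List Bool) (hlen : (comp.length : Int) = n) :
    (markMul n p fuel q comp).length = comp.length ∧
    ∀ i : Int, 0 ≤ i → i < n →
      (PySem.List.pyGetD (markMul n p fuel q comp) i false = true ↔
        PySem.List.pyGetD comp i false = true ∨ (q ≤ i ∧ p ∣ (i - q))) := by
  induction fuel generalizing q comp with
  | zero =>
    refine ⟨rfl, fun i h0 hn => ?_⟩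
    rw [show markMul n p 0 q comp = comp from rfl]
    rw [or_iff_left (by rintro ⟨hqi, -⟩; omega)]
  | succ fuel ih =>
    rw [markMul]
    by_cases hqn : q < n
    · rw [if_pos hqn]
      have hlen' : ((comp.set q.toNat true).length : Int) = n := by
        simpa [List.length_set] using hlen
      obtain ⟨ihlen, ihget⟩ := ih (q + p) (by omega) (by omega) (comp.set q.toNat true) hlen'
      refine ⟨by simpa [List.length_set] using ihlen, fun i h0 hn => ?_⟩
      rw [ihget i h0 hn]
      have hset : PySem.List.pyGetD (comp.set q.toNat true) i false
          = if i = q then true else PySem.List.pyGetD comp i false := by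
        rw [PySem.List.pyGetD_eq_getElem _ _ h0 (by omega),
          List.getElem_set]
        by_cases hiq : i = q
        · rw [if_pos (by omega), if_pos hiq]
        · rw [if_neg (by omega), if_neg hiq]
          rw [PySem.List.pyGetD_eq_getElem _ _ h0 (by omega)]
      rw [hset]
      by_cases hiq : i = q
      · subst hiq
        refine ⟨fun _ => Or.inr ⟨le_refl i, ⟨0, by ring⟩⟩, fun _ => by simp⟩
      · rw [if_neg hiq]
        constructor
        · rintro (hold | ⟨hle, k, hk⟩)
          · exact Or.inl hold
          · exact Or.inr ⟨by omega, ⟨k + 1, by linear_combination hk⟩⟩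
        · rintro (hold | ⟨hle, k, hk⟩)
          · exact Or.inl hold
          · refine Or.inr ⟨?_, ⟨k - 1, by linear_combination hk⟩⟩
            have hpk : 1 ≤ p * k := by rw [← hk]; omega
            have hk1 : 1 ≤ k := by nlinarith
            have hpk2 : p ≤ p * k := by nlinarith
            have : p ≤ i - q := by rw [← hk] at hpk2; omega
            omega
    · rw [if_neg hqn]
      refine ⟨rfl, fun i h0 hn => ?_⟩
      rw [or_iff_left (by rintro ⟨hqi, -⟩; omega)]

lemma marked_final (p i n : Int) (hp : 2 ≤ p) (hin : i < n) (hnp : n ≤ p * p) :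
    Marked p i ↔ ∃ d, 2 ≤ d ∧ d * d ≤ i ∧ d ∣ i := by
  constructor
  · rintro ⟨d, h2, -, hdd, hdvd⟩
    exact ⟨d, h2, hdd, hdvd⟩
  · rintro ⟨d, h2, hdd, hdvd⟩
    refine ⟨d, h2, ?_, hdd, hdvd⟩
    by_contra hdp
    push_neg at hdp
    nlinarith

lemma sieveLoop_spec (n : Int) (fuel : Nat) (p : Int) (hp : 2 ≤ p)
    (hfuel : (n - p).toNat ≤ fuel) (comp : List Bool) (hlen : (comp.length : Int) = n)
    (hinv : ∀ i : Int, 0 ≤ i → i < n →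
      (PySem.List.pyGetD comp i false = true ↔ Marked p i)) :
    ∀ i : Int, 0 ≤ i → i < n →
      (PySem.List.pyGetD (sieveLoop n fuel p comp) i false = true ↔
        ∃ d, 2 ≤ d ∧ d * d ≤ i ∧ d ∣ i) := by
  induction fuel generalizing p comp with
  | zero =>
    intro i h0 hn
    have hnp : n ≤ p := by omega
    rw [show sieveLoop n 0 p comp = comp from rfl, hinv i h0 hn]
    exact marked_final p i n hp hn (by nlinarith)
  | succ fuel ih =>
    intro i h0 hn
    rw [sieveLoop]
    by_cases hpp : p * p < n
    · rw [if_pos hpp]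
      have hpn : p < n := by nlinarith
      obtain ⟨mlen, mget⟩ := markMul_spec n p hp (n - p * p).toNat (p * p)
        (by positivity) (le_refl _) comp hlen
      have hlen' : (((markMul n p (n - p * p).toNat (p * p) comp).length : Int)) = n := by
        rw [mlen]; exact hlen
      refine ih (p + 1) (by omega) (by omega) _ hlen' ?_ i h0 hn
      intro j h0j hjn
      rw [mget j h0j hjn, hinv j h0j hjn]
      constructor
      · rintro (hm | ⟨hle, k, hk⟩)
        · obtain ⟨d, h2, hdp, hdd, hdvd⟩ := hm
          exact ⟨d, h2, by omega, hdd, hdvd⟩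
        · exact ⟨p, hp, by omega, hle, ⟨k + p, by linear_combination hk⟩⟩
      · rintro ⟨d, h2, hdp1, hdd, hdvd⟩
        by_cases hdp : d < p
        · exact Or.inl ⟨d, h2, hdp, hdd, hdvd⟩
        · have hdq : d = p := by omega
          subst hdq
          obtain ⟨k, hk⟩ := hdvd
          exact Or.inr ⟨hdd, ⟨k - d, by linear_combination hk⟩⟩
    · rw [if_neg hpp]
      rw [hinv i h0 hn]
      exact marked_final p i n hp hn (by omega)

-- ===== the scan loop as a fold =====
def step1 (s : Int × Int) (k : Int) : Int × Int := if cB k > s.2 then (k, cB k) else s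

lemma scanLoop_fold (n : Int) (comp : List Bool) (fuel : Nat) (i b bc : Int)
    (hfuel : (i - 1).toNat ≤ fuel) :
    scanLoop n comp fuel i b bc =
      ((PySem.List.pyRange i 1 (-1)).foldl
        (fun s k => if PySem.List.pyGetD comp k false = false then step1 s k else s)
        (b, bc)).1 := by
  induction fuel generalizing i b bc with
  | zero =>
    rw [show scanLoop n comp 0 i b bc = b from rfl,
      PySem.List.pyRange_neg_one_eq_nil (by omega : i ≤ 1)]
    rfl
  | succ N ih =>
    rw [scanLoop]
    by_cases h2 : 2 ≤ i
    case neg =>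
      rw [if_neg h2, PySem.List.pyRange_neg_one_eq_nil (by omega : i ≤ 1)]
      rfl
    rw [if_pos h2, PySem.List.pyRange_neg_one_cons (by omega : 1 < i),
      List.foldl_cons]
    by_cases hp : PySem.List.pyGetD comp i false = false
    · rw [if_pos hp, if_pos hp]
      simp only [step1, cB, gt_iff_lt]
      by_cases hgt : (((PySem.Int.toChars i).countP
          (fun ch => ch ∈ ['0', '2', '4', '6', '8']) : Nat) : Int) > bc
      · rw [if_pos hgt, if_pos (by simpa using hgt)]
        exact ih _ _ _ (by omega)
      · rw [if_neg hgt, if_neg (by simpa using hgt)]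
        exact ih _ _ _ (by omega)
    · rw [if_neg hp, if_neg hp]
      exact ih _ _ _ (by omega)

lemma foldl_filter_step (comp : List Bool) (L : List Int) (s : Int × Int) :
    L.foldl (fun s k => if PySem.List.pyGetD comp k false = false then step1 s k else s) s
      = (L.filter (fun k => PySem.List.pyGetD comp k false == false)).foldl step1 s := by
  induction L generalizing s with
  | nil => rfl
  | cons k t ih =>
    by_cases h : PySem.List.pyGetD comp k false = false <;>
      simp [List.foldl_cons, h, ih]

lemma cB_nonneg (i : Int) : 0 ≤ cB i := by unfold cB; positivity

lemma step1_gt {s : Int × Int} {k : Int} (h : cB k > s.2) : step1 s k = (k, cB k) := by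
  simp [step1, h]

lemma step1_le {s : Int × Int} {k : Int} (h : ¬ cB k > s.2) : step1 s k = s := by
  simp [step1, h]

lemma foldl_drop_zero (K : List Int) (b bc : Int) (hbc : 0 ≤ bc) :
    K.foldl step1 (b, bc) = (K.filter (fun k => decide (1 ≤ cB k))).foldl step1 (b, bc) := by
  induction K generalizing b bc with
  | nil => rfl
  | cons k t ih =>
    by_cases h : 1 ≤ cB k
    · simp only [List.filter_cons, h, decide_true, List.foldl_cons, if_true]
      by_cases hgt : cB k > bc
      · rw [show step1 (b, bc) k = (k, cB k) from step1_gt hgt]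
        exact ih k (cB k) (cB_nonneg k)
      · rw [show step1 (b, bc) k = (b, bc) from step1_le hgt]
        exact ih b bc hbc
    · have h0 : cB k = 0 := le_antisymm (by omega) (cB_nonneg k)
      have hle : ¬ cB k > bc := by omega
      simp only [List.filter_cons, h, decide_false, List.foldl_cons,
        show step1 (b, bc) k = (b, bc) from step1_le hle]
      exact ih b bc hbc

def step2 (key : Int → Int) (acc : Option Int) (x : Int) : Option Int :=
  match acc with
  | none => some x
  | some m => if key m < key x then some x else some m

lemma max?_eq_foldl_step2 (K : List Int) (key : Int → Int) :
    PySem.List.max? K key = K.foldl (step2 key) none := by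
  unfold PySem.List.max?
  congr 1
  funext acc x
  cases acc <;> rfl

lemma fold_pair_opt (t : List Int) (m : Int) :
    (t.foldl step1 (m, cB m)).1 = (t.foldl (step2 cB) (some m)).getD 0 := by
  induction t generalizing m with
  | nil => rfl
  | cons x t ih =>
    simp only [List.foldl_cons]
    by_cases h : cB m < cB x
    · rw [show step1 (m, cB m) x = (x, cB x) from step1_gt (by simpa using h),
        show step2 cB (some m) x = some x by simp [step2, h]]
      exact ih x
    · rw [show step1 (m, cB m) x = (m, cB m) from step1_le (by simpa using h),
        show step2 cB (some m) x = some m by simp [step2, h]]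
      exact ih m

lemma foldl_vs_max? (K : List Int) (b : Int) (hK : ∀ k ∈ K, 1 ≤ cB k) (hne : K ≠ []) :
    (K.foldl step1 (b, 0)).1 = (PySem.List.max? K cB).getD 0 := by
  cases K with
  | nil => exact absurd rfl hne
  | cons x t =>
    have hx : 1 ≤ cB x := hK x (by simp)
    rw [max?_eq_foldl_step2]
    simp only [List.foldl_cons]
    rw [show step1 (b, 0) x = (x, cB x) from step1_gt (by simpa using hx),
      show step2 cB none x = some x by simp [step2]]
    exact fold_pair_opt t x

lemma max?_fold_congr (key1 key2 : Int → Int) (K : List Int) (acc : Option Int)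
    (h : ∀ k ∈ K, key1 k = key2 k) (hacc : ∀ m, acc = some m → key1 m = key2 m) :
    K.foldl (step2 key1) acc = K.foldl (step2 key2) acc := by
  induction K generalizing acc with
  | nil => rfl
  | cons k t ih =>
    simp only [List.foldl_cons]
    have hk : key1 k = key2 k := h k (by simp)
    cases acc with
    | none =>
      simp only [step2]
      exact ih _ (fun x hx => h x (by simp [hx])) (by rintro m hm; cases hm; exact hk)
    | some m =>
      have hm : key1 m = key2 m := hacc m rfl
      simp only [step2, hm, hk]
      by_cases hc : key2 m < key2 k <;> simp only [hc, if_true, if_false] <;>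
        exact ih _ (fun x hx => h x (by simp [hx]))
          (by rintro mm hmm; cases hmm; first | exact hk | exact hm)

lemma max?_congr (K : List Int) (key1 key2 : Int → Int) (h : ∀ k ∈ K, key1 k = key2 k) :
    PySem.List.max? K key1 = PySem.List.max? K key2 := by
  rw [max?_eq_foldl_step2, max?_eq_foldl_step2]
  exact max?_fold_congr key1 key2 K none h (by simp)

-- A's loop body, restated for the proofs
def bodyA (nums : PySem.Dict Int Int) (i : Int) : PySem.Dict Int Int :=
  let primes := (PySem.List.pyRange 2 (i + 1) 1).filter (fun j => PySem.Int.mod i j == 0)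
  let count : Int := 0
  if primes.length == 1 then
    let evens := (PySem.Int.toChars i).map (fun ch => (PySem.Int.ofChars? [ch]).getD 0)
    let count := evens.foldl (fun count num =>
      if num ∈ ([2, 4, 6, 8, 0] : List Int) then count + 1 else count) count
    if count ≥ 1 then nums.insert i count else nums
  else nums

lemma f_eq (n : Int) :
    f n = (PySem.List.max?
      ((PySem.List.pyRange (n - 1) 0 (-1)).foldl bodyA PySem.Dict.empty).keys
      (fun k => ((PySem.List.pyRange (n - 1) 0 (-1)).foldl bodyA PySem.Dict.empty).getD k 0)).getD 0
    := rfl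

lemma bodyA_eq (acc : PySem.Dict Int Int) (x : Int) (hx : 0 < x) :
    bodyA acc x = if condA x then acc.insert x (cB x) else acc := by
  show (if (((PySem.List.pyRange 2 (x + 1) 1).filter
        (fun j => PySem.Int.mod x j == 0)).length == 1)
      then (if ((PySem.Int.toChars x).map (fun ch => (PySem.Int.ofChars? [ch]).getD 0)).foldl
              (fun count num => if num ∈ ([2, 4, 6, 8, 0] : List Int) then count + 1 else count)
              0 ≥ 1
            then acc.insert x (((PySem.Int.toChars x).map
                (fun ch => (PySem.Int.ofChars? [ch]).getD 0)).foldl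
              (fun count num => if num ∈ ([2, 4, 6, 8, 0] : List Int) then count + 1 else count) 0)
            else acc)
      else acc)
    = (if condA x then acc.insert x (cB x) else acc)
  rw [countEq x (by omega)]
  unfold condA
  rcases hA : isAP x with _ | _ <;> by_cases hc : 1 ≤ cB x <;>
    simp [isAP] at hA ⊢ <;> simp [hA, hc]

-- ===== VERDICT (by name: the statement is the Claim_ definition above) =====
theorem f_spec : Claim_equal_f := by
  intro n _ hpre
  have hn : 3 ≤ n := hpre
  show f n = f_alt n
  -- the common qualifying list, largest first
  have hRnodup : (PySem.List.pyRange (n - 1) 0 (-1)).Nodup := by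
    rw [PySem.List.pyRange_neg_one_eq_reverse]
    exact List.nodup_reverse.mpr (PySem.List.nodup_pyRange_one _ _)
  -- ===== A's side =====
  have hfold : (PySem.List.pyRange (n - 1) 0 (-1)).foldl bodyA PySem.Dict.empty
      = (PySem.List.pyRange (n - 1) 0 (-1)).foldl
          (fun d i => if condA i then d.insert i (cB i) else d) PySem.Dict.empty := by
    apply PySem.List.foldl_congr_mem
    intro acc x hx
    exact bodyA_eq acc x (PySem.List.mem_pyRange_neg_one.mp hx).1
  have hitems := dict_items (PySem.List.pyRange (n - 1) 0 (-1)) hRnodup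
  have hkeys : ((PySem.List.pyRange (n - 1) 0 (-1)).foldl
      (fun d i => if condA i then d.insert i (cB i) else d)
      (PySem.Dict.empty : PySem.Dict Int Int)).keys
      = (PySem.List.pyRange (n - 1) 0 (-1)).filter condA := by
    show (((PySem.List.pyRange (n - 1) 0 (-1)).foldl
        (fun d i => if condA i then d.insert i (cB i) else d)
        (PySem.Dict.empty : PySem.Dict Int Int)).items).map (fun p => p.1) = _
    rw [hitems, List.map_map]
    have hco : ((fun (p : Int × Int) => p.1) ∘ fun i => (i, cB i)) = id := rfl
    rw [hco, List.map_id]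
  have hKnodup : ((PySem.List.pyRange (n - 1) 0 (-1)).filter condA).Nodup :=
    hRnodup.filter _
  have hgetD : ∀ k ∈ (PySem.List.pyRange (n - 1) 0 (-1)).filter condA,
      ((PySem.List.pyRange (n - 1) 0 (-1)).foldl
        (fun d i => if condA i then d.insert i (cB i) else d)
        (PySem.Dict.empty : PySem.Dict Int Int)).getD k 0 = cB k := by
    intro k hk
    apply PySem.Dict.getD_of_mem_items
    · rw [hitems]
      exact List.mem_map.mpr ⟨k, hk, rfl⟩
    · rw [hkeys]; exact hKnodup
  have hA : f n = (PySem.List.max?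
      ((PySem.List.pyRange (n - 1) 0 (-1)).filter condA) cB).getD 0 := by
    rw [f_eq, hfold]
    rw [show (fun k => ((PySem.List.pyRange (n - 1) 0 (-1)).foldl
        (fun d i => if condA i then d.insert i (cB i) else d)
        (PySem.Dict.empty : PySem.Dict Int Int)).getD k 0)
      = fun k => ((PySem.List.pyRange (n - 1) 0 (-1)).foldl
        (fun d i => if condA i then d.insert i (cB i) else d)
        (PySem.Dict.empty : PySem.Dict Int Int)).getD k 0 from rfl]
    rw [hkeys]
    rw [max?_congr _ _ cB hgetD]
  -- the list, rewritten over the ascending range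
  have hKdesc : (PySem.List.pyRange (n - 1) 0 (-1)).filter condA
      = ((PySem.List.pyRange 2 n 1).filter condA).reverse := by
    rw [PySem.List.pyRange_neg_one_eq_reverse,
      show (0 : Int) + 1 = 1 from rfl, show n - 1 + 1 = n by ring,
      List.filter_reverse,
      PySem.List.pyRange_one_cons (by omega : (1:Int) < n),
      List.filter_cons]
    rw [show condA 1 = false by decide]
    simp
  -- ===== B's side =====
  have hsize : (if (0:Int) < n then n else 0) = n := if_pos (by omega)
  have hlen0 : ((List.replicate n.toNat false).length : Int) = n := by
    simp [Int.toNat_of_nonneg (by omega : (0:Int) ≤ n)]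
  have hinv0 : ∀ i : Int, 0 ≤ i → i < n →
      (PySem.List.pyGetD (List.replicate n.toNat false) i false = true ↔ Marked 2 i) := by
    intro i h0 hn'
    rw [PySem.List.pyGetD_eq_getElem _ _ h0 (by omega), List.getElem_replicate]
    constructor
    · intro h; cases h
    · rintro ⟨d, hd2, hd2', -, -⟩; omega
  have hsieve := sieveLoop_spec n n.toNat 2 (le_refl 2) (by omega)
    (List.replicate n.toNat false) hlen0 hinv0
  have hBalt : f_alt n = scanLoop n
      (sieveLoop n n.toNat 2 (List.replicate n.toNat false)) n.toNat (n - 1) 0 0 := by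
    show scanLoop n (sieveLoop n n.toNat 2
        (List.replicate (if (0:Int) < n then n else 0).toNat false)) n.toNat (n - 1) 0 0 = _
    rw [hsize]
  set sv := sieveLoop n n.toNat 2 (List.replicate n.toNat false) with hsv
  have hB : f_alt n = ((((PySem.List.pyRange (n - 1) 1 (-1)).filter
        (fun k => PySem.List.pyGetD sv k false == false)).filter
        (fun k => decide (1 ≤ cB k))).foldl step1 ((0 : Int), (0 : Int))).1 := by
    rw [hBalt, scanLoop_fold n _ n.toNat (n - 1) 0 0 (by omega),
      foldl_filter_step, foldl_drop_zero _ _ _ (le_refl 0)]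
  -- the two filtered lists coincide
  have hlists : ((PySem.List.pyRange (n - 1) 1 (-1)).filter
        (fun k => PySem.List.pyGetD sv k false == false)).filter
        (fun k => decide (1 ≤ cB k))
      = (PySem.List.pyRange (n - 1) 0 (-1)).filter condA := by
    rw [hKdesc, PySem.List.pyRange_neg_one_eq_reverse,
      show (1 : Int) + 1 = 2 from rfl, show n - 1 + 1 = n by ring,
      List.filter_reverse, List.filter_reverse, List.filter_filter]
    congr 1
    apply List.filter_congr
    intro k hk
    have hk' := PySem.List.mem_pyRange_one.mp hk
    have hAPiff := isAP_iff k (by omega)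
    have hsk := hsieve k (by omega) hk'.2
    have hprime : isAP k = (PySem.List.pyGetD sv k false == false) := by
      have hiff : isAP k = true ↔ ¬ (PySem.List.pyGetD sv k false = true) := by
        rw [hAPiff]
        constructor
        · rintro ⟨-, hnd⟩ hb
          exact ((noDvd_iff k (by omega)).mp hnd) (hsk.mp hb)
        · intro hb
          refine ⟨hk'.1, (noDvd_iff k (by omega)).mpr ?_⟩
          intro hex
          exact hb (hsk.mpr hex)
      cases hbv : PySem.List.pyGetD sv k false with
      | false =>
        have h1 : isAP k = true := hiff.mpr (by rw [hbv]; simp)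
        rw [h1]; decide
      | true =>
        have h1 : isAP k = false := Bool.eq_false_iff.mpr (fun h => (hiff.mp h) hbv)
        rw [h1]; decide
    unfold condA
    rw [hprime, Bool.and_comm]
  -- nonemptiness and the value bound
  have h2mem : (2 : Int) ∈ (PySem.List.pyRange (n - 1) 0 (-1)).filter condA := by
    rw [hKdesc, List.mem_reverse, List.mem_filter]
    exact ⟨PySem.List.mem_pyRange_one.mpr ⟨le_refl 2, by omega⟩, by decide⟩
  have hKpos : ∀ k ∈ (PySem.List.pyRange (n - 1) 0 (-1)).filter condA, 1 ≤ cB k := by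
    intro k hk
    have := (List.mem_filter.mp hk).2
    unfold condA at this
    simp at this
    exact this.2
  have hKne : (PySem.List.pyRange (n - 1) 0 (-1)).filter condA ≠ [] := by
    intro h; rw [h] at h2mem; cases h2mem
  rw [hA, hB, hlists, foldl_vs_max? _ 0 hKpos hKne]
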